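-- pv_equiv track=rewrite | github.com/ChaseHutcheson/Python | Pygame/Cohol Capstone/logic.py | snapLines
-- ===== SOURCE A (Python) =====
-- import math
--
-- def distance(point1, point2):
--     return math.sqrt((point1[0] - point2[0]) ** 2 + (point2[1] - point2[1]) ** 2)
--
-- def snapLines(lines, point):
--     closest_distance = 10
--     closest_end = None
--     closest_line_index = None
--
--     for index, line in enumerate(lines):
--         # Check the distance to both the start and end points of each line
--         for line_end in line:
--             dist = distance(point, line_end)
--             if dist < closest_distance:
--                 closest_distance = dist
--                 closest_end = line_end
--                 closest_line_index = index
--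
--     return closest_end, closest_line_index
-- ===== SOURCE B (Python) =====
-- import math
--
-- def distance(point1, point2):
--     return math.sqrt((point1[0] - point2[0]) ** 2 + (point2[1] - point2[1]) ** 2)
--
-- def snapLines(lines, point):
--     candidates = [(line_end, index) for index, line in enumerate(lines) for line_end in line]
--     near = [c for c in candidates if distance(point, c[0]) < 10]
--     if not near:
--         return None, None
--     line_end, index = min(near, key=lambda c: distance(point, c[0]))
--     return line_end, index
-- ===== Notes on version B (the rewrite author's own statement) =====
-- stated objective: simpler
-- what changed: Replaced A's nested min-tracking scan with mutable best-so-far state by flattening all (line_end, index) candidates, filtering those with distance < 10, and taking min(..., key=distance) (first minimum), returning (None, None) when the filtered list is empty; the buggy distance helper is kept verbatim.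
import Mathlib
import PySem

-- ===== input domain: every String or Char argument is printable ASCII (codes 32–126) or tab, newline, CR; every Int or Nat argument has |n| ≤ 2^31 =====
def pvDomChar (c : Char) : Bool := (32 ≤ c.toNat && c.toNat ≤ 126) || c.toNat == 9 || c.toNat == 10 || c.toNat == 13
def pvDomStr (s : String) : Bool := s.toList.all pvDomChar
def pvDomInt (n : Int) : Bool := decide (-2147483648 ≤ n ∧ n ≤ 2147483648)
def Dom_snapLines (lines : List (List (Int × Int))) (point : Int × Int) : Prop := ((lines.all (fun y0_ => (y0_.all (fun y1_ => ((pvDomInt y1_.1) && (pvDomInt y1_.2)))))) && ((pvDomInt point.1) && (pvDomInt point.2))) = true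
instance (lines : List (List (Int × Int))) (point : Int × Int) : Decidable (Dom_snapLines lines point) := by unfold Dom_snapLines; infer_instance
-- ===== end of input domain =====

-- B re-implements A as flatten-candidates / filter-by-threshold / min-with-key instead of a
-- nested min-tracking scan; B's buggy distance helper is kept exactly as in A. Objective: simpler.

-- ===== PORT A =====
-- distance(point1, point2) = math.sqrt((p1x-p2x)**2 + (p2y-p2y)**2); the second term is 0 and the
-- argument is the perfect square (p1x-p2x)^2, so on Dom (|coords| ≤ 2^31, hence |p1x-p2x| ≤ 2^32)
-- math.sqrt returns exactly the integer |p1x-p2x|; ported exactly via Nat.sqrt of the integer argument.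
def pyDistance (point1 point2 : Int × Int) : Int :=
  Int.ofNat (Nat.sqrt (((point1.1 - point2.1) ^ 2 + (point2.2 - point2.2) ^ 2).toNat))

def snapLines (lines : List (List (Int × Int))) (point : Int × Int) : (Option (Int × Int)) × Option Int :=
  let st := (PySem.List.enumerate lines).foldl
    (fun st ie =>
      ie.2.foldl
        (fun st line_end =>
          let dist := pyDistance point line_end
          if dist < st.1 then (dist, some line_end, some ie.1) else st)
        st)
    ((10 : Int), (none : Option (Int × Int)), (none : Option Int))
  (st.2.1, st.2.2)

-- ===== PORT B =====
def snapLines_alt (lines : List (List (Int × Int))) (point : Int × Int) : (Option (Int × Int)) × Option Int :=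
  let candidates := (PySem.List.enumerate lines).flatMap (fun ie => ie.2.map (fun line_end => (line_end, ie.1)))
  let near := candidates.filter (fun c => pyDistance point c.1 < 10)
  match PySem.List.min? near (fun c => pyDistance point c.1) with
  | none => (none, none)
  | some c => (some c.1, some c.2)

-- ===== PRECONDITION & SPEC =====
def Spec_snapLines (lines : List (List (Int × Int))) (point : Int × Int) (out : (Option (Int × Int)) × Option Int) : Prop := out = snapLines_alt lines point
instance (lines : List (List (Int × Int))) (point : Int × Int) (out : (Option (Int × Int)) × Option Int) : Decidable (Spec_snapLines lines point out) := by unfold Spec_snapLines; infer_instance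

-- ===== CLAIM (what is proved, stated in full; the proofs are below) =====
def Claim_equal_snapLines : Prop := ∀ (lines : List (List (Int × Int))) (point : Int × Int), Dom_snapLines lines point → Spec_snapLines lines point (snapLines lines point)

-- ===== LEMMAS AND PROOFS =====

-- A's update step, viewed on a flattened candidate (line_end, index)
def stepA (point : Int × Int) (st : Int × Option (Int × Int) × Option Int)
    (c : (Int × Int) × Int) : Int × Option (Int × Int) × Option Int :=
  let dist := pyDistance point c.1
  if dist < st.1 then (dist, some c.1, some c.2) else st

-- running-min step on plain candidates (the non-option core of PySem.List.min?)
def stepG (point : Int × Int) (m c : (Int × Int) × Int) : (Int × Int) × Int :=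
  if pyDistance point c.1 < pyDistance point m.1 then c else m

theorem flat_eq (point : Int × Int) (l : List (Int × List (Int × Int)))
    (st : Int × Option (Int × Int) × Option Int) :
    l.foldl
      (fun st ie =>
        ie.2.foldl
          (fun st line_end =>
            let dist := pyDistance point line_end
            if dist < st.1 then (dist, some line_end, some ie.1) else st)
          st)
      st
    = (l.flatMap (fun ie => ie.2.map (fun line_end => (line_end, ie.1)))).foldl (stepA point) st := by
  induction l generalizing st with
  | nil => rfl
  | cons ie t ih =>
    simp only [List.foldl_cons, List.flatMap_cons, List.foldl_append, List.foldl_map, ih, stepA]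

theorem min?_cons_eq_foldG (point : Int × Int) (m : (Int × Int) × Int)
    (cs : List ((Int × Int) × Int)) :
    PySem.List.min? (m :: cs) (fun c => pyDistance point c.1)
      = some (cs.foldl (stepG point) m) := by
  simp only [PySem.List.min?, List.foldl_cons]
  induction cs generalizing m with
  | nil => rfl
  | cons c t ih =>
    simp only [List.foldl_cons, stepG]
    split <;> exact ih _

theorem hit_eq (point : Int × Int) (cs : List ((Int × Int) × Int)) (m : (Int × Int) × Int)
    (hm : pyDistance point m.1 < 10) :
    cs.foldl (stepA point) (pyDistance point m.1, some m.1, some m.2)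
      = (fun m' => (pyDistance point m'.1, some m'.1, some m'.2))
          ((cs.filter (fun c => pyDistance point c.1 < 10)).foldl (stepG point) m) := by
  induction cs generalizing m with
  | nil => rfl
  | cons c t ih =>
    simp only [List.foldl_cons, List.filter_cons, stepA, stepG]
    by_cases hc : pyDistance point c.1 < pyDistance point m.1
    · have h10 : pyDistance point c.1 < 10 := lt_trans hc hm
      simp only [hc, h10, decide_true, if_true, List.foldl_cons, stepG]
      exact ih c h10
    · by_cases h10 : pyDistance point c.1 < 10
      · simp only [hc, h10, decide_true, if_true, if_false, List.foldl_cons]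
        rw [show stepG point m c = m from if_neg hc]
        exact ih m hm
      · simp only [hc, h10, if_false]
        exact ih m hm

theorem main_eq (point : Int × Int) (cs : List ((Int × Int) × Int)) :
    cs.foldl (stepA point) ((10 : Int), (none : Option (Int × Int)), (none : Option Int))
      = match PySem.List.min? (cs.filter (fun c => pyDistance point c.1 < 10))
            (fun c => pyDistance point c.1) with
        | none => ((10 : Int), none, none)
        | some m => (pyDistance point m.1, some m.1, some m.2) := by
  induction cs with
  | nil => rfl
  | cons c t ih =>
    simp only [List.foldl_cons, List.filter_cons, stepA, stepG]
    by_cases h10 : pyDistance point c.1 < 10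
    · simp only [h10, decide_true, if_true, min?_cons_eq_foldG]
      exact hit_eq point t c h10
    · simp only [h10, if_false]
      exact ih

-- ===== VERDICT (by name: the statement is the Claim_ definition above) =====
theorem snapLines_spec : Claim_equal_snapLines := by
  intro lines point _
  show snapLines lines point = snapLines_alt lines point
  unfold snapLines snapLines_alt
  rw [flat_eq, main_eq]
  cases h : PySem.List.min?
      (((PySem.List.enumerate lines).flatMap
          (fun ie => ie.2.map (fun line_end => (line_end, ie.1)))).filter
        (fun c => pyDistance point c.1 < 10))
      (fun c => pyDistance point c.1) <;> simp [h]
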